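-- pv_equiv track=rewrite | github.com/lewis6991/tcl-ls | src/tcl_lsp/analysis/resolver.py | _matching_required_package
-- ===== SOURCE A (Python) =====
-- def _normalize_command_name(name: str) -> str:
--     return name[2:] if name.startswith('::') else name
--
-- def _matching_required_package(
--     command_name: str,
--     required_packages: frozenset[str],
-- ) -> str | None:
--     normalized_name = _normalize_command_name(command_name)
--     for package_name in sorted(required_packages):
--         if normalized_name == package_name or normalized_name.startswith(f'{package_name}::'):
--             return package_name
--     return None
-- ===== SOURCE B (Python) =====
-- def _matching_required_package(command_name, required_packages):
--     name = command_name[2:] if command_name.startswith('::') else command_name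
--     i = name.find('::')
--     while i != -1:
--         if name[:i] in required_packages:
--             return name[:i]
--         i = name.find('::', i + 1)
--     return name if name in required_packages else None
-- ===== Notes on version B (the rewrite author's own statement) =====
-- stated objective: faster
-- what changed: B never sorts or scans the package collection: it probes the command name's '::'-boundary prefixes shortest-first against the given frozenset; the shortest matching boundary prefix is exactly the lexicographically smallest matching package.
import Mathlib
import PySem

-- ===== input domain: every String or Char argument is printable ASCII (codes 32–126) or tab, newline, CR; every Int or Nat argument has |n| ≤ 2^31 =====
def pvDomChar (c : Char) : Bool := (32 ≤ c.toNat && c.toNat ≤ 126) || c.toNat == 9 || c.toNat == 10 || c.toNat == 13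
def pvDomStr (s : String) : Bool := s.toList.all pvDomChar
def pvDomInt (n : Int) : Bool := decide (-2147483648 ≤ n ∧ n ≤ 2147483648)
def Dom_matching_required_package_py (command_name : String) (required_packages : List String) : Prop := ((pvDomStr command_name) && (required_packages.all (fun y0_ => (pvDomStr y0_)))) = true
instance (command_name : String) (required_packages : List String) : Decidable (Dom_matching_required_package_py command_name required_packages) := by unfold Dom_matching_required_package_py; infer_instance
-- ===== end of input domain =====

-- B replaces A's sort-then-scan of the packages with a single shortest-first probe of the command
-- name's '::'-boundary prefixes against the given set (objective: faster).

-- ===== PORT A =====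
-- _normalize_command_name: name[2:] if name.startswith('::') else name
def pvNormalizeA (name : List Char) : List Char :=
  if PySem.Chars.startswith name [':', ':'] then PySem.List.slice name (some 2) none else name

-- for package_name in sorted(required_packages): if normalized == p or normalized.startswith(p + '::'): return p; return None
def matching_required_package_py (command_name : String) (required_packages : List String) : Option String :=
  let normalized := pvNormalizeA command_name.toList
  (PySem.List.sorted required_packages (fun x => x) false).find?
    (fun p => normalized == p.toList || PySem.Chars.startswith normalized (p.toList ++ [':', ':']))

-- ===== PORT B =====
-- i = name.find('::'); while i != -1: if name[:i] in required_packages: return name[:i];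
--   i = name.find('::', i + 1); then: return name if name in required_packages else None.
-- Fuel = an upper bound on the iteration count (i strictly increases and stays below len(name));
-- it only makes the same loop total, the 0 case is never reached from the top-level call.
def pvFindLoop (S : PySem.Set String) (name : List Char) : Nat → Int → Option String
  | 0, _ => none
  | fuel + 1, i =>
    if i = -1 then
      if PySem.Set.contains S (String.ofList name) then some (String.ofList name) else none
    else
      if PySem.Set.contains S (String.ofList (PySem.List.slice name none (some i))) then
        some (String.ofList (PySem.List.slice name none (some i)))
      else
        pvFindLoop S name fuel (PySem.Chars.findFrom name [':', ':'] (i + 1) none)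

def matching_required_package_py_alt (command_name : String) (required_packages : List String) : Option String :=
  let name := if PySem.Chars.startswith command_name.toList [':', ':'] then
      PySem.List.slice command_name.toList (some 2) none else command_name.toList
  pvFindLoop required_packages name (name.length + 2) (PySem.Chars.find name [':', ':'])

-- ===== PRECONDITION & SPEC =====
def Spec_matching_required_package_py (command_name : String) (required_packages : List String) (out : Option String) : Prop := out = matching_required_package_py_alt command_name required_packages
instance (command_name : String) (required_packages : List String) (out : Option String) : Decidable (Spec_matching_required_package_py command_name required_packages out) := by unfold Spec_matching_required_package_py; infer_instance

-- ===== CLAIM (what is proved, stated in full; the proofs are below) =====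
def Claim_equal_matching_required_package_py : Prop := ∀ (command_name : String) (required_packages : List String), Dom_matching_required_package_py command_name required_packages → Spec_matching_required_package_py command_name required_packages (matching_required_package_py command_name required_packages)

-- ===== LEMMAS AND PROOFS =====

-- q is a '::'-boundary prefix of rest: rest = q ++ t with t empty or starting with '::'
def pvBnd (rest q : List Char) : Prop :=
  ∃ t, rest = q ++ t ∧ (t = [] ∨ t.take 2 = [':', ':'])

-- position j carries an occurrence of '::'
def pvOcc (name : List Char) (j : Nat) : Prop := [':', ':'] <+: name.drop j

-- A's loop test holds for p iff p.toList is a boundary prefix of n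
theorem pvCondIff (n : List Char) (p : String) :
    ((n == p.toList || PySem.Chars.startswith n (p.toList ++ [':', ':'])) = true) ↔
      pvBnd n p.toList := by
  constructor
  · intro h
    rcases (by simpa using h :
        n = p.toList ∨ PySem.Chars.startswith n (p.toList ++ [':', ':']) = true) with h | h
    · exact ⟨[], by simpa using h, Or.inl rfl⟩
    · obtain ⟨t, ht⟩ := (PySem.Chars.startswith_iff n (p.toList ++ [':', ':'])).mp h
      exact ⟨':' :: ':' :: t, by rw [← ht]; simp, Or.inr rfl⟩
  · rintro ⟨t, rfl, ht | ht⟩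
    · simp [ht]
    · have hsw : PySem.Chars.startswith (p.toList ++ t) (p.toList ++ [':', ':']) = true := by
        apply (PySem.Chars.startswith_iff _ _).mpr
        refine ⟨t.drop 2, ?_⟩
        conv_rhs => rw [show t = t.take 2 ++ t.drop 2 from (List.take_append_drop 2 t).symm, ht]
        simp
      simp [hsw]

theorem pvBnd_iff (name q : List Char) :
    pvBnd name q ↔ (q = name ∨ (q = name.take q.length ∧ pvOcc name q.length)) := by
  constructor
  · rintro ⟨t, rfl, ht | ht⟩
    · simp [ht]
    · right
      refine ⟨List.take_left.symm, ?_⟩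
      unfold pvOcc
      rw [List.drop_left, List.prefix_iff_eq_take]
      exact ht.symm
  · rintro (rfl | ⟨hq, hocc⟩)
    · exact ⟨[], by simp, Or.inl rfl⟩
    · refine ⟨name.drop q.length, ?_, Or.inr ?_⟩
      · conv_lhs => rw [← List.take_append_drop q.length name]
        rw [← hq]
      · unfold pvOcc at hocc
        rw [List.prefix_iff_eq_take] at hocc
        exact hocc.symm

theorem pvOcc_bound {name : List Char} {j : Nat} (h : pvOcc name j) : j + 2 ≤ name.length := by
  unfold pvOcc at h
  have hlen := h.length_le
  simp only [List.length_drop] at hlen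
  have hj : j ≤ name.length := by
    by_contra hgt
    have hnil : name.drop j = [] := List.drop_eq_nil_of_le (by omega)
    rw [hnil] at h
    exact absurd (List.eq_nil_of_prefix_nil h) (by simp)
  simp at hlen
  omega

-- loop invariant: i is -1 with every occurrence already refuted, or i is an occurrence
-- with every earlier occurrence refuted
def pvInv (S : PySem.Set String) (name : List Char) (i : Int) : Prop :=
  (i = -1 ∧ ∀ j, pvOcc name j → PySem.Set.contains S (String.ofList (name.take j)) = false) ∨
  (0 ≤ i ∧ i.toNat + 2 ≤ name.length ∧ pvOcc name i.toNat ∧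
    ∀ j < i.toNat, pvOcc name j → PySem.Set.contains S (String.ofList (name.take j)) = false)

-- after a failed probe at occurrence i, the next find state re-establishes the invariant
theorem pvStep (S : PySem.Set String) (name : List Char) (i : Int)
    (h0 : 0 ≤ i) (h2 : i.toNat + 2 ≤ name.length) (_hocc : pvOcc name i.toNat)
    (hprev : ∀ j < i.toNat, pvOcc name j → PySem.Set.contains S (String.ofList (name.take j)) = false)
    (hcur : PySem.Set.contains S (String.ofList (name.take i.toNat)) = false) :
    pvInv S name (PySem.Chars.findFrom name [':', ':'] (i + 1) none) ∧
      (0 ≤ PySem.Chars.findFrom name [':', ':'] (i + 1) none →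
        i.toNat + 1 ≤ (PySem.Chars.findFrom name [':', ':'] (i + 1) none).toNat) := by
  have hk : i + 1 = ((i.toNat + 1 : Nat) : Int) := by omega
  have hkle : i.toNat + 1 ≤ name.length := by omega
  have hrefuted : ∀ j ≤ i.toNat, pvOcc name j →
      PySem.Set.contains S (String.ofList (name.take j)) = false := by
    intro j hj hoccj
    rcases Nat.lt_or_ge j i.toNat with hlt | hge
    · exact hprev j hlt hoccj
    · have hje : j = i.toNat := by omega
      rw [hje]; exact hcur
  rw [hk]
  by_cases hne : PySem.Chars.findFrom name [':', ':'] ((i.toNat + 1 : Nat) : Int) none = -1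
  · refine ⟨Or.inl ⟨hne, ?_⟩, by rw [hne]; omega⟩
    intro j hoccj
    rcases Nat.lt_or_ge j (i.toNat + 1) with hlt | hge
    · exact hrefuted j (by omega) hoccj
    · exfalso
      have hnotin := (PySem.Chars.findFrom_natCast_eq_neg_one_iff name [':', ':']
        (i.toNat + 1) hkle).mp hne
      apply hnotin
      apply (PySem.Chars.isIn_iff_infix _ _).mp
      apply (PySem.Chars.exists_prefix_drop_iff_isIn _ _).mp
      refine ⟨j - (i.toNat + 1), ?_⟩
      have hdd : (name.drop (i.toNat + 1)).drop (j - (i.toNat + 1)) = name.drop j := by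
        rw [List.drop_drop]
        congr 1
        omega
      rw [hdd]
      exact hoccj
  · obtain ⟨hge, hpref, hmin⟩ :=
      PySem.Chars.findFrom_natCast_spec name [':', ':'] (i.toNat + 1) hkle hne
    have hpos : (0 : Int) ≤ PySem.Chars.findFrom name [':', ':'] ((i.toNat + 1 : Nat) : Int) none :=
      le_trans (by omega) hge
    have hocc' : pvOcc name (PySem.Chars.findFrom name [':', ':'] ((i.toNat + 1 : Nat) : Int) none).toNat :=
      hpref
    have hb' := pvOcc_bound hocc'
    refine ⟨Or.inr ⟨hpos, hb', hocc', ?_⟩, by intro _; omega⟩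
    intro j hj hoccj
    rcases Nat.lt_or_ge j (i.toNat + 1) with hlt | hge2
    · exact hrefuted j (by omega) hoccj
    · exact absurd hoccj (hmin j (by omega) hj)

theorem pvLoop_none (S : PySem.Set String) (name : List Char) :
    ∀ fuel (i : Int), pvInv S name i →
      (i = -1 → 1 ≤ fuel) → (0 ≤ i → name.length + 1 ≤ fuel + i.toNat) →
      pvFindLoop S name fuel i = none →
      ∀ q, pvBnd name q → PySem.Set.contains S (String.ofList q) = false := by
  intro fuel
  induction fuel with
  | zero =>
    intro i hinv h1 h2 _
    rcases hinv with ⟨rfl, -⟩ | ⟨hpos, hlen, -, -⟩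
    · omega
    · have := h2 hpos; omega
  | succ fuel ih =>
    intro i hinv h1 h2 hrun q hq
    simp only [pvFindLoop] at hrun
    rcases hinv with ⟨rfl, hall⟩ | ⟨hpos, hlen, hocc, hprev⟩
    · rw [if_pos rfl] at hrun
      by_cases hc : PySem.Set.contains S (String.ofList name) = true
      · rw [if_pos hc] at hrun; cases hrun
      · rcases (pvBnd_iff name q).mp hq with rfl | ⟨hqt, hoccq⟩
        · exact Bool.eq_false_iff.mpr hc
        · rw [hqt]; exact hall q.length hoccq
    · rw [if_neg (by omega)] at hrun
      have hiN : i = ((i.toNat : Nat) : Int) := by omega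
      have hsl : PySem.List.slice name none (some i) = name.take i.toNat := by
        rw [hiN]; exact PySem.List.slice_to_natCast name i.toNat
      by_cases hc : PySem.Set.contains S (String.ofList (PySem.List.slice name none (some i))) = true
      · rw [if_pos hc] at hrun; cases hrun
      · rw [if_neg hc] at hrun
        have hcur : PySem.Set.contains S (String.ofList (name.take i.toNat)) = false := by
          rw [← hsl]; exact Bool.eq_false_iff.mpr hc
        obtain ⟨hinv', hmono⟩ := pvStep S name i hpos hlen hocc hprev hcur
        apply ih _ hinv' (by intro _; omega) ?_ hrun q hq
        intro hpos'
        have := hmono hpos'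
        omega

theorem pvLoop_some (S : PySem.Set String) (name : List Char) :
    ∀ fuel (i : Int) s, pvInv S name i →
      pvFindLoop S name fuel i = some s →
      pvBnd name s.toList ∧ PySem.Set.contains S s = true ∧
        ∀ q', pvBnd name q' → PySem.Set.contains S (String.ofList q') = true →
          s.toList.length ≤ q'.length := by
  intro fuel
  induction fuel with
  | zero => intro i s _ hrun; cases hrun
  | succ fuel ih =>
    intro i s hinv hrun
    simp only [pvFindLoop] at hrun
    rcases hinv with ⟨rfl, hall⟩ | ⟨hpos, hlen, hocc, hprev⟩
    · rw [if_pos rfl] at hrun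
      by_cases hc : PySem.Set.contains S (String.ofList name) = true
      · rw [if_pos hc] at hrun
        injection hrun with h1
        subst h1
        refine ⟨by rw [String.toList_ofList]; exact ⟨[], by simp, Or.inl rfl⟩, hc, ?_⟩
        intro q' hq' hcq'
        rw [String.toList_ofList]
        rcases (pvBnd_iff name q').mp hq' with rfl | ⟨hqt, hoccq⟩
        · exact le_refl _
        · rw [hqt] at hcq'
          rw [hall q'.length hoccq] at hcq'
          exact absurd hcq' (by simp)
      · rw [if_neg hc] at hrun; cases hrun
    · rw [if_neg (by omega)] at hrun
      have hiN : i = ((i.toNat : Nat) : Int) := by omega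
      have hsl : PySem.List.slice name none (some i) = name.take i.toNat := by
        rw [hiN]; exact PySem.List.slice_to_natCast name i.toNat
      by_cases hc : PySem.Set.contains S (String.ofList (PySem.List.slice name none (some i))) = true
      · rw [if_pos hc] at hrun
        injection hrun with h1
        subst h1
        rw [hsl] at hc ⊢
        have htlen : (name.take i.toNat).length = i.toNat := by
          rw [List.length_take]; omega
        refine ⟨?_, hc, ?_⟩
        · rw [String.toList_ofList]
          apply (pvBnd_iff name _).mpr
          right
          rw [htlen]
          exact ⟨rfl, hocc⟩
        · intro q' hq' hcq'
          rw [String.toList_ofList, htlen]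
          rcases (pvBnd_iff name q').mp hq' with rfl | ⟨hqt, hoccq⟩
          · omega
          · have hj2 := pvOcc_bound hoccq
            rcases Nat.lt_or_ge q'.length i.toNat with hlt | hge
            · exfalso
              rw [hqt] at hcq'
              rw [hprev q'.length hlt hoccq] at hcq'
              exact absurd hcq' (by simp)
            · exact hge
      · rw [if_neg hc] at hrun
        have hcur : PySem.Set.contains S (String.ofList (name.take i.toNat)) = false := by
          rw [← hsl]; exact Bool.eq_false_iff.mpr hc
        obtain ⟨hinv', -⟩ := pvStep S name i hpos hlen hocc hprev hcur
        exact ih _ s hinv' hrun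

-- first element of a ≤-sorted list satisfying cond, when a minimal satisfier is known
theorem pvFindFirst (cond : String → Bool) (s : String) :
    ∀ l : List String, l.Pairwise (· ≤ ·) → s ∈ l → cond s = true →
      (∀ p ∈ l, cond p = true → s ≤ p) → l.find? cond = some s := by
  intro l
  induction l with
  | nil => intro _ hs; cases hs
  | cons h t ih =>
    intro hp hs hcs hmin
    by_cases hch : cond h = true
    · rw [List.find?_cons_of_pos hch]
      rcases List.mem_cons.mp hs with rfl | hmem
      · rfl
      · have h1 : s ≤ h := hmin h (List.mem_cons_self ..) hch
        have h2 : h ≤ s := (List.pairwise_cons.mp hp).1 s hmem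
        rw [le_antisymm h2 h1]
    · rw [List.find?_cons_of_neg hch]
      have hs' : s ∈ t := by
        rcases List.mem_cons.mp hs with rfl | hmem
        · exact absurd hcs hch
        · exact hmem
      exact ih (List.pairwise_cons.mp hp).2 hs' hcs (fun p hp' hcp => hmin p (List.mem_cons_of_mem _ hp') hcp)

theorem pvPrefixLt : ∀ (q t' : List Char) (c : Char), q < q ++ c :: t' := by
  intro q
  induction q with
  | nil => intro t' c; exact List.nil_lt_cons c t'
  | cons a q' ih =>
    intro t' c
    rw [List.cons_append, List.cons_lt_cons_iff]
    exact Or.inr ⟨rfl, ih t' c⟩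

-- ===== VERDICT (by name: the statement is the Claim_ definition above) =====
theorem matching_required_package_py_spec : Claim_equal_matching_required_package_py := by
  intro cmd pkgs _
  unfold Spec_matching_required_package_py matching_required_package_py matching_required_package_py_alt
  simp only []
  set n := pvNormalizeA cmd.toList with hn
  have hnB : (if PySem.Chars.startswith cmd.toList [':', ':'] then
      PySem.List.slice cmd.toList (some 2) none else cmd.toList) = n := rfl
  rw [hnB]
  set cond : String → Bool :=
    fun p => n == p.toList || PySem.Chars.startswith n (p.toList ++ [':', ':']) with hcond
  have hInv0 : pvInv pkgs n (PySem.Chars.find n [':', ':']) := by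
    have hm1 : (-1 : Int) ≤ PySem.Chars.find n [':', ':'] := PySem.Chars.neg_one_le_find n [':', ':']
    rcases eq_or_lt_of_le hm1 with heq | hlt
    · left
      refine ⟨heq.symm, ?_⟩
      intro j hoccj
      exfalso
      have hno := (PySem.Chars.find_eq_neg_one_iff n [':', ':']).mp heq.symm
      apply hno
      apply (PySem.Chars.isIn_iff_infix _ _).mp
      apply (PySem.Chars.exists_prefix_drop_iff_isIn _ _).mp
      exact ⟨j, hoccj⟩
    · right
      have h0 : (0 : Int) ≤ PySem.Chars.find n [':', ':'] := by omega
      obtain ⟨hpref, hmin⟩ := PySem.Chars.find_spec h0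
      have hocc : pvOcc n (PySem.Chars.find n [':', ':']).toNat := hpref
      refine ⟨h0, pvOcc_bound hocc, hocc, ?_⟩
      intro j hj hoccj
      exact absurd hoccj (hmin j hj)
  cases hB : pvFindLoop pkgs n (n.length + 2) (PySem.Chars.find n [':', ':']) with
  | none =>
    rw [List.find?_eq_none]
    intro p hp hcp
    have hpmem : p ∈ pkgs := (PySem.List.mem_sorted ..).mp hp
    have hbnd : pvBnd n p.toList := (pvCondIff n p).mp hcp
    have hfalse := pvLoop_none pkgs n (n.length + 2) (PySem.Chars.find n [':', ':'])
      hInv0 (by intro _; omega) (by intro _; omega) hB p.toList hbnd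
    rw [String.ofList_toList] at hfalse
    have htrue : PySem.Set.contains pkgs p = true := (PySem.Set.contains_iff pkgs p).mpr hpmem
    rw [hfalse] at htrue
    exact Bool.false_ne_true htrue
  | some s =>
    obtain ⟨hb, hcon, hmin⟩ := pvLoop_some pkgs n (n.length + 2) (PySem.Chars.find n [':', ':'])
      s hInv0 hB
    have hsmem : s ∈ pkgs := (PySem.Set.contains_iff pkgs s).mp hcon
    have hq_pre : s.toList <+: n := by obtain ⟨t, ht, -⟩ := hb; exact ⟨t, ht.symm⟩
    apply pvFindFirst cond s
    · have := PySem.List.sorted_pairwise pkgs (fun x => x)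
      simpa using this
    · exact (PySem.List.mem_sorted ..).mpr hsmem
    · exact (pvCondIff n s).mpr hb
    · intro p hp hcp
      have hpmem : p ∈ pkgs := (PySem.List.mem_sorted ..).mp hp
      have hbnd : pvBnd n p.toList := (pvCondIff n p).mp hcp
      have hlen : s.toList.length ≤ p.toList.length := by
        apply hmin p.toList hbnd
        rw [String.ofList_toList]
        exact (PySem.Set.contains_iff pkgs p).mpr hpmem
      have hp_pre : p.toList <+: n := by obtain ⟨t, ht, -⟩ := hbnd; exact ⟨t, ht.symm⟩
      have hqp : s.toList <+: p.toList := List.prefix_of_prefix_length_le hq_pre hp_pre hlen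
      obtain ⟨t, ht⟩ := hqp
      cases t with
      | nil =>
        have he : s.toList = p.toList := by simpa using ht
        have hsp : s = p := by
          have h2 := congrArg String.ofList he
          rwa [String.ofList_toList, String.ofList_toList] at h2
        exact le_of_eq hsp
      | cons c t' =>
        apply le_of_lt
        apply String.lt_iff_toList_lt.mpr
        rw [← ht]
        exact pvPrefixLt s.toList t' c
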